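-- pv_equiv track=rewrite | github.com/Raghav-Modi/Simplex | 2018ME20708_RaghavModi_Assignment3.py | enter
-- ===== SOURCE A (Python) =====
-- def enter(mat ,n):                                      ## function 2
--     mini = 0
--     col = -1
--     for i in range(n):
--         if mat[0][i] < mini:
--             mini = mat[0][i]
--             col = i
--     return (col)
-- ===== SOURCE B (Python) =====
-- def enter(mat, n):
--     if n <= 0 or not mat:
--         return -1
--     row = mat[0]
--
--     def best(lo, hi):
--         # index of the leftmost most-negative entry of row[lo:hi], or -1 if none negative
--         if hi - lo == 1:
--             return lo if row[lo] < 0 else -1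
--         mid = (lo + hi) // 2
--         l = best(lo, mid)
--         r = best(mid, hi)
--         if l == -1:
--             return r
--         if r == -1:
--             return l
--         return l if row[l] <= row[r] else r
--
--     return best(0, n)
-- ===== Notes on version B (the rewrite author's own statement) =====
-- stated objective: alternative
-- what changed: Replaces A's fused left-to-right scan tracking a running (min, index) pair with a divide-and-conquer recursion that splits the window in half, solves each half, and merges the two candidate indices (preferring the left on ties).
import Mathlib
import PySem

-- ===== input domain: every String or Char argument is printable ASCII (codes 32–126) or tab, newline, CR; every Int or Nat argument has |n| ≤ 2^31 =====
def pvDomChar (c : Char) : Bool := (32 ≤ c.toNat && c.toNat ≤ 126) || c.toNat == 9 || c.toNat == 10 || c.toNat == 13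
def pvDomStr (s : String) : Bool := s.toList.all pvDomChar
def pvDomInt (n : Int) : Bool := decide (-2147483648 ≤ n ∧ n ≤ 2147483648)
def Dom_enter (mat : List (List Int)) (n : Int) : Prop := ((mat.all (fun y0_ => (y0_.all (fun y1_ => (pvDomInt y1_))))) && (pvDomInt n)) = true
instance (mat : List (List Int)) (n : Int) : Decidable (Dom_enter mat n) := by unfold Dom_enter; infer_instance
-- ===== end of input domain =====

-- B replaces A's fused left-to-right scan tracking a running (min, index) pair with a
-- divide-and-conquer recursion: split the window in half, solve each half, merge the two
-- candidate indices (preferring the left half on ties).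

-- ===== PORT A =====
def enter (mat : List (List Int)) (n : Int) : Int :=
  let s := (PySem.List.pyRange 0 n 1).foldl
    (fun (st : Int × Int) (i : Int) =>
      let v := (PySem.List.pyGet? ((PySem.List.pyGet? mat 0).getD []) i).getD 0
      if v < st.1 then (v, i) else st)
    (0, -1)
  s.2

-- ===== PORT B =====
/-- `bestRec row fuel lo hi`: leftmost most-negative index of `row[lo:hi]`, `-1` if none
negative. `fuel` is a structural totality guard only (any `fuel ≥ hi - lo` works; Python's
`best` needs none); the `hi ≤ lo + 1` test merges Python's `hi - lo == 1` base case with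
the empty window `hi ≤ lo`, on which Python's `best` is never called. -/
def bestRec (row : List Int) : Nat → Nat → Nat → Int
  | 0, _, _ => -1
  | fuel + 1, lo, hi =>
    if hi ≤ lo + 1 then
      (if (PySem.List.pyGet? row (lo : Int)).getD 0 < 0 then (lo : Int) else -1)
    else
      let mid := (lo + hi) / 2
      let l := bestRec row fuel lo mid
      let r := bestRec row fuel mid hi
      if l = -1 then r
      else if r = -1 then l
      else if (PySem.List.pyGet? row l).getD 0 ≤ (PySem.List.pyGet? row r).getD 0 then l else r

def enter_alt (mat : List (List Int)) (n : Int) : Int :=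
  if n ≤ 0 || mat.isEmpty then -1
  else bestRec ((PySem.List.pyGet? mat 0).getD []) n.toNat 0 n.toNat

-- ===== PRECONDITION & SPEC =====
-- A raises IndexError when 0 < n and the matrix is empty or its first row is shorter than n.
def Pre_enter (mat : List (List Int)) (n : Int) : Prop :=
  0 < n → (mat ≠ [] ∧ n ≤ ((mat.headD []).length : Int))
instance (mat : List (List Int)) (n : Int) : Decidable (Pre_enter mat n) := by
  unfold Pre_enter; infer_instance
def pvWitness_enter : List (List Int) × Int := ([[3, -1, 2]], 3)

def Spec_enter (mat : List (List Int)) (n : Int) (out : Int) : Prop := out = enter_alt mat n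
instance (mat : List (List Int)) (n : Int) (out : Int) : Decidable (Spec_enter mat n out) := by unfold Spec_enter; infer_instance

-- ===== CLAIM (what is proved, stated in full; the proofs are below) =====
def Claim_equal_enter : Prop := ∀ (mat : List (List Int)) (n : Int), Dom_enter mat n → Pre_enter mat n → Spec_enter mat n (enter mat n)

-- ===== LEMMAS AND PROOFS =====

/-- Abbreviation for the value A and B read at index `k`. -/
def rv (row : List Int) (k : Nat) : Int := (row[k]?).getD 0

/-- `j` is `-1` if `row[lo:hi]` has no negative entry, else the leftmost index of the
minimum of `row[lo:hi]` (which is then negative). -/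
def Good (row : List Int) (lo hi : Nat) (j : Int) : Prop :=
  (j = -1 ∧ ∀ k, lo ≤ k → k < hi → ¬ rv row k < 0) ∨
  (∃ jn : Nat, j = (jn : Int) ∧ lo ≤ jn ∧ jn < hi ∧ rv row jn < 0 ∧
    (∀ k, lo ≤ k → k < hi → rv row jn ≤ rv row k) ∧
    (∀ k, lo ≤ k → k < jn → rv row jn < rv row k))

theorem Good_unique (row : List Int) (lo hi : Nat) (j₁ j₂ : Int)
    (h₁ : Good row lo hi j₁) (h₂ : Good row lo hi j₂) : j₁ = j₂ := by
  rcases h₁ with ⟨e₁, n₁⟩ | ⟨a, rfl, ha1, ha2, ha3, ha4, ha5⟩ <;>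
    rcases h₂ with ⟨e₂, n₂⟩ | ⟨b, rfl, hb1, hb2, hb3, hb4, hb5⟩
  · rw [e₁, e₂]
  · exact absurd hb3 (n₁ b hb1 hb2)
  · exact absurd ha3 (n₂ a ha1 ha2)
  · have hab : rv row a ≤ rv row b := ha4 b hb1 hb2
    have hba : rv row b ≤ rv row a := hb4 a ha1 ha2
    rcases lt_trichotomy a b with h | h | h
    · exact absurd (hb5 a ha1 h) (by omega)
    · rw [h]
    · exact absurd (ha5 b hb1 h) (by omega)

theorem bestRec_good (row : List Int) : ∀ (fuel lo hi : Nat), hi - lo ≤ fuel → lo < hi →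
    hi ≤ row.length → Good row lo hi (bestRec row fuel lo hi) := by
  intro fuel
  induction fuel with
  | zero => intro lo hi hd hlt _; omega
  | succ d ih =>
    intro lo hi hd hlt hlen
    rw [bestRec]
    by_cases hbase : hi ≤ lo + 1
    · rw [if_pos hbase]
      have hlo : lo < row.length := by omega
      have hget : (PySem.List.pyGet? row (lo : Int)).getD 0 = rv row lo := by
        rw [PySem.List.pyGet?_natCast]; rfl
      rw [hget]
      by_cases hneg : rv row lo < 0
      · refine Or.inr ⟨lo, by simp [hneg], le_refl lo, by omega, hneg, ?_, ?_⟩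
        · intro k hk1 hk2
          have hkl : k = lo := by omega
          subst hkl
          exact le_refl _
        · intro k hk1 hk2
          omega
      · rw [if_neg hneg]
        refine Or.inl ⟨rfl, ?_⟩
        intro k hk1 hk2
        have hkl : k = lo := by omega
        subst hkl
        exact hneg
    · rw [if_neg hbase]
      set mid := (lo + hi) / 2 with hmid
      have hm1 : lo < mid := by omega
      have hm2 : mid < hi := by omega
      have hl := ih lo mid (by omega) hm1 (by omega)
      have hr := ih mid hi (by omega) hm2 hlen
      simp only
      rcases hl with ⟨el, nl⟩ | ⟨a, ea, ha1, ha2, ha3, ha4, ha5⟩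
      · rw [el, if_pos rfl]
        rcases hr with ⟨er, nr⟩ | ⟨b, eb, hb1, hb2, hb3, hb4, hb5⟩
        · rw [er]
          exact Or.inl ⟨rfl, fun k hk1 hk2 => by
            by_cases h : k < mid
            · exact nl k hk1 h
            · exact nr k (by omega) hk2⟩
        · rw [eb]
          refine Or.inr ⟨b, rfl, by omega, hb2, hb3, ?_, ?_⟩
          · intro k hk1 hk2
            by_cases h : k < mid
            · have := nl k hk1 h; omega
            · exact hb4 k (by omega) hk2
          · intro k hk1 hk2
            by_cases h : k < mid
            · have := nl k hk1 h; omega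
            · exact hb5 k (by omega) hk2
      · have hlne : bestRec row d lo mid ≠ -1 := by rw [ea]; omega
        rw [if_neg hlne]
        rcases hr with ⟨er, nr⟩ | ⟨b, eb, hb1, hb2, hb3, hb4, hb5⟩
        · rw [er, if_pos rfl, ea]
          refine Or.inr ⟨a, rfl, ha1, by omega, ha3, ?_, fun k hk1 hk2 => ha5 k hk1 hk2⟩
          intro k hk1 hk2
          by_cases h : k < mid
          · exact ha4 k hk1 h
          · have := nr k (by omega) hk2; omega
        · have hrne : bestRec row d mid hi ≠ -1 := by rw [eb]; omega
          rw [if_neg hrne, ea, eb]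
          have hga : (PySem.List.pyGet? row (a : Int)).getD 0 = rv row a := by
            rw [PySem.List.pyGet?_natCast]; rfl
          have hgb : (PySem.List.pyGet? row (b : Int)).getD 0 = rv row b := by
            rw [PySem.List.pyGet?_natCast]; rfl
          rw [hga, hgb]
          by_cases hle : rv row a ≤ rv row b
          · rw [if_pos hle]
            refine Or.inr ⟨a, rfl, ha1, by omega, ha3, ?_, fun k hk1 hk2 => ha5 k hk1 hk2⟩
            intro k hk1 hk2
            by_cases h : k < mid
            · exact ha4 k hk1 h
            · have := hb4 k (by omega) hk2; omega
          · rw [if_neg hle]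
            refine Or.inr ⟨b, rfl, by omega, hb2, hb3, ?_, ?_⟩
            · intro k hk1 hk2
              by_cases h : k < mid
              · have := ha4 k hk1 h; omega
              · exact hb4 k (by omega) hk2
            · intro k hk1 hk2
              by_cases h : k < mid
              · have := ha4 k hk1 h; omega
              · exact hb5 k (by omega) hk2

/-- A's loop, as structural recursion on the number of remaining indices, starting at `i`. -/
def aloop (row : List Int) : Nat → Nat → Int × Int → Int × Int
  | 0, _, st => st
  | k + 1, i, st =>
    let v := rv row i
    aloop row k (i + 1) (if v < st.1 then (v, (i : Int)) else st)

/-- Loop invariant of A: partial `Good` over the prefix, with the running minimum tied to it. -/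
def AInv (row : List Int) (i : Nat) (m c : Int) : Prop :=
  (m = 0 ∧ c = -1 ∧ ∀ k, k < i → ¬ rv row k < 0) ∨
  (∃ cn : Nat, c = (cn : Int) ∧ cn < i ∧ m = rv row cn ∧ m < 0 ∧
    (∀ k, k < i → m ≤ rv row k) ∧ (∀ k, k < cn → m < rv row k))

theorem aloop_ainv (row : List Int) : ∀ (k i : Nat) (m c : Int),
    AInv row i m c → AInv row (i + k) (aloop row k i (m, c)).1 (aloop row k i (m, c)).2 := by
  intro k
  induction k with
  | zero =>
    intro i m c hainv
    rw [aloop]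
    exact hainv
  | succ d ihd =>
    intro i m c hainv
    rw [aloop]
    simp only
    rw [show i + (d + 1) = (i + 1) + d from by omega]
    by_cases hv : rv row i < m
    · rw [if_pos hv]
      refine ihd (i + 1) _ _ ?_
      have hm0 : m ≤ 0 := by
        rcases hainv with ⟨hm, _, _⟩ | ⟨_, _, _, _, hneg, _, _⟩ <;> omega
      refine Or.inr ⟨i, rfl, by omega, rfl, by omega, ?_, ?_⟩
      · intro k hk
        by_cases h : k < i
        · rcases hainv with ⟨hm, _, hka⟩ | ⟨_, _, _, _, _, hmin, _⟩
          · have := hka k h; omega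
          · have := hmin k h; omega
        · have : k = i := by omega
          rw [this]
      · intro k hk
        rcases hainv with ⟨hm, _, hka⟩ | ⟨_, _, _, _, _, hmin, _⟩
        · have := hka k hk; omega
        · have := hmin k hk; omega
    · rw [if_neg hv]
      refine ihd (i + 1) _ _ ?_
      rcases hainv with ⟨hm, hc, hka⟩ | ⟨cn, hc, hcn, hm, hneg, hmin, hleft⟩
      · refine Or.inl ⟨hm, hc, ?_⟩
        intro k hk
        by_cases h : k < i
        · exact hka k h
        · have : k = i := by omega
          rw [this]; omega
      · refine Or.inr ⟨cn, hc, by omega, hm, hneg, ?_, hleft⟩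
        intro k hk
        by_cases h : k < i
        · exact hmin k h
        · have : k = i := by omega
          rw [this]; omega

theorem ainv_good (row : List Int) (hi : Nat) (m c : Int) (h : AInv row hi m c) :
    Good row 0 hi c := by
  rcases h with ⟨_, hc, hk⟩ | ⟨cn, hc, hcn, hm, hneg, hmin, hleft⟩
  · exact Or.inl ⟨hc, fun k _ hk2 => hk k hk2⟩
  · exact Or.inr ⟨cn, hc, Nat.zero_le cn, hcn, by omega,
      fun k _ hk2 => by have := hmin k hk2; omega,
      fun k _ hk2 => by have := hleft k hk2; omega⟩

/-- A's indexed `pyRange` foldl equals `aloop` on the same window. -/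
theorem fold_eq_aloop (row : List Int) : ∀ (k i : Nat) (st : Int × Int),
    (PySem.List.pyRange (i : Int) ((i : Int) + (k : Int)) 1).foldl
      (fun (st : Int × Int) (j : Int) =>
        let v := (PySem.List.pyGet? row j).getD 0
        if v < st.1 then (v, j) else st) st
    = aloop row k i st := by
  intro k
  induction k with
  | zero =>
    intro i st
    rw [PySem.List.pyRange_one_eq_nil (by simp), aloop]
    rfl
  | succ k ih =>
    intro i st
    have hcons : PySem.List.pyRange (i : Int) ((i : Int) + ((k + 1 : Nat) : Int)) 1
        = (i : Int) :: PySem.List.pyRange ((i : Int) + 1) ((i : Int) + ((k + 1 : Nat) : Int)) 1 := by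
      apply PySem.List.pyRange_one_cons; push_cast; omega
    rw [hcons, List.foldl_cons]
    rw [show ((i : Int) + ((k + 1 : Nat) : Int)) = ((i + 1 : Nat) : Int) + (k : Int) by push_cast; ring,
      show ((i : Int) + 1) = ((i + 1 : Nat) : Int) by push_cast; ring]
    rw [ih (i + 1)]
    conv_rhs => rw [aloop]
    have hget : (PySem.List.pyGet? row (i : Int)).getD 0 = rv row i := by
      rw [PySem.List.pyGet?_natCast]; rfl
    simp only [hget]

-- ===== VERDICT (by name: the statement is the Claim_ definition above) =====
theorem enter_spec : Claim_equal_enter := by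
  intro mat n _ hpre
  unfold Spec_enter enter enter_alt
  by_cases hn : n ≤ 0
  · rw [PySem.List.pyRange_one_eq_nil hn]
    simp [hn]
  · replace hn : 0 < n := by omega
    obtain ⟨hne, hlen⟩ := hpre hn
    obtain ⟨r, rest, rfl⟩ : ∃ r rest, mat = r :: rest := by
      cases mat with
      | nil => exact absurd rfl hne
      | cons r rest => exact ⟨r, rest, rfl⟩
    have hr0 : (PySem.List.pyGet? (r :: rest) 0).getD [] = r := by simp
    have hguard : ¬ (decide (n ≤ 0) || (r :: rest).isEmpty) = true := by simp; omega
    rw [if_neg hguard, hr0]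
    have hnn : ((n.toNat : Nat) : Int) = n := by omega
    have hfoldl := fold_eq_aloop r n.toNat 0 (0, -1)
    simp only [Nat.cast_zero, zero_add, hnn] at hfoldl
    rw [hfoldl]
    have hlenr : n.toNat ≤ r.length := by simp at hlen; omega
    have hainv0 : AInv r 0 0 (-1) := Or.inl ⟨rfl, rfl, fun k hk => by omega⟩
    have hainv := aloop_ainv r n.toNat 0 0 (-1) hainv0
    rw [Nat.zero_add] at hainv
    have hgA : Good r 0 n.toNat (aloop r n.toNat 0 (0, -1)).2 := ainv_good r n.toNat _ _ hainv
    have hgB : Good r 0 n.toNat (bestRec r n.toNat 0 n.toNat) :=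
      bestRec_good r n.toNat 0 n.toNat (by omega) (by omega) hlenr
    exact Good_unique r 0 n.toNat _ _ hgA hgB
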